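-- pv_equiv track=rewrite | github.com/harshitbhat/Competitve-Coding | learn/bit-manipulation/09.min-flips.py | minFlips
-- ===== SOURCE A (Python) =====
-- def minFlips(a, b, c):
--     ans = 0
--
--     for i in range(32):
--         bitA = (a >> i) & 1
--         bitB = (b >> i) & 1
--         bitC = (c >> i) & 1
--
--         if (bitA | bitB) != bitC:
--             if bitC == 0:
--                 if bitA == 1 and bitB == 1:
--                     ans += 2
--                 else:
--                     ans += 1
--             else:
--                 ans += 1
--
--     return ans
--
-- a = 2;
--
-- b = 6;
--
-- c = 5
-- ===== SOURCE B (Python) =====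
-- def minFlips(a, b, c):
--     M = (1 << 32) - 1
--     return (
--         ((a & ~c) & M).bit_count()
--         + ((b & ~c) & M).bit_count()
--         + ((~a & ~b & c) & M).bit_count()
--     )
-- ===== Notes on version B (the rewrite author's own statement) =====
-- stated objective: simpler
-- what changed: Replaces the 32-iteration per-bit loop with branching by three masked popcounts: bits of a (resp. b) that must be cleared where c is 0, plus bits where c is 1 but a|b is 0, each counted with int.bit_count() after masking to 32 bits.
import Mathlib
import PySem

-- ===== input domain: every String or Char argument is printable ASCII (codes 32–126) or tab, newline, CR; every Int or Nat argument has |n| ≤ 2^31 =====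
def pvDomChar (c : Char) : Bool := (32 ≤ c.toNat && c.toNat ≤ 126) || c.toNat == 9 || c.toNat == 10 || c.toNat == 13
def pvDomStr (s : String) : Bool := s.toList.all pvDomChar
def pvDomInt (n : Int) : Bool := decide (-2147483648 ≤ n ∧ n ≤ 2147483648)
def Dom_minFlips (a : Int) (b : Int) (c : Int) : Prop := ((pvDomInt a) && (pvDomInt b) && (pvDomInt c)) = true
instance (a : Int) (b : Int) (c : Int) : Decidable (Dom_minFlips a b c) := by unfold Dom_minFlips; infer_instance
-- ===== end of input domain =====

-- B replaces A's 32-iteration per-bit loop with three masked popcounts (simpler, no per-bit branching).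

-- ===== PORT A =====
-- literal port of the Python loop: for i in range(32): extract bits with shift/&1, branch, accumulate
def minFlips (a : Int) (b : Int) (c : Int) : Int :=
  (PySem.List.pyRange 0 32 1).foldl (fun ans i =>
    let bitA := PySem.Int.band (a >>> i.toNat) 1   -- i ∈ range(32) is nonnegative, so .toNat is exact
    let bitB := PySem.Int.band (b >>> i.toNat) 1
    let bitC := PySem.Int.band (c >>> i.toNat) 1
    if PySem.Int.bor bitA bitB ≠ bitC then
      if bitC = 0 then
        if bitA = 1 ∧ bitB = 1 then ans + 2 else ans + 1
      else ans + 1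
    else ans) 0

-- ===== PORT B =====
-- port of Source B: M = (1<<32)-1; sum of three bit_count() calls on masked bitwise terms
def minFlips_alt (a : Int) (b : Int) (c : Int) : Int :=
  let M : Int := ((1 : Int) <<< 32) - 1
  (PySem.Int.bitCount (PySem.Int.band (PySem.Int.band a (Int.not c)) M) : Int)
  + (PySem.Int.bitCount (PySem.Int.band (PySem.Int.band b (Int.not c)) M) : Int)
  + (PySem.Int.bitCount (PySem.Int.band (PySem.Int.band (PySem.Int.band (Int.not a) (Int.not b)) c) M) : Int)

-- ===== PRECONDITION & SPEC =====
def Spec_minFlips (a : Int) (b : Int) (c : Int) (out : Int) : Prop := out = minFlips_alt a b c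
instance (a : Int) (b : Int) (c : Int) (out : Int) : Decidable (Spec_minFlips a b c out) := by unfold Spec_minFlips; infer_instance

-- ===== CLAIM (what is proved, stated in full; the proofs are below) =====
def Claim_equal_minFlips : Prop := ∀ (a : Int) (b : Int) (c : Int), Dom_minFlips a b c → Spec_minFlips a b c (minFlips a b c)

-- ===== LEMMAS AND PROOFS =====

-- bits of (m &&& k) are a subset of m's, so m splits into (m &&& k) + (m ^^^ (m &&& k))
theorem pvAndAddXor : ∀ (m k : Nat), (m &&& k) + (m ^^^ (m &&& k)) = m := by
  intro m
  induction m using Nat.strong_induction_on with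
  | _ m ih =>
    intro k
    by_cases hm : m = 0
    · simp [hm]
    · have h2 : m / 2 < m := Nat.div_lt_self (Nat.pos_of_ne_zero hm) (by norm_num)
      have IH := ih (m / 2) h2 (k / 2)
      have hd : (m &&& k) / 2 = (m / 2) &&& (k / 2) := Nat.and_div_two
      have hx : (m ^^^ (m &&& k)) / 2 = (m / 2) ^^^ ((m / 2) &&& (k / 2)) := by
        rw [Nat.xor_div_two, Nat.and_div_two]
      have ha : (m &&& k) % 2 = 1 ↔ m % 2 = 1 ∧ k % 2 = 1 := Nat.and_mod_two_eq_one
      have hb : (m ^^^ (m &&& k)) % 2 = 1 ↔ ¬(m % 2 = 1 ↔ (m &&& k) % 2 = 1) :=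
        Nat.xor_mod_two_eq_one
      omega

theorem pvSubAnd (m k : Nat) : m - (m &&& k) = m ^^^ (m &&& k) := by
  have h := pvAndAddXor m k
  omega

-- testBit of a nonnegative Int is its toNat's testBit
theorem pvTestBitNonneg (x : Int) (i : Nat) (hx : 0 ≤ x) :
    x.testBit i = x.toNat.testBit i := by
  rcases x with m | m
  · rfl
  · exact absurd hx (by simp [Int.negSucc_eq]; omega)

-- testBit of a negative Int is the flipped testBit of its complement
theorem pvTestBitNeg (x : Int) (i : Nat) (hx : x < 0) :
    x.testBit i = !((-x - 1).toNat.testBit i) := by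
  rcases x with m | m
  · exact absurd hx (by simp [Int.ofNat_eq_natCast])
  · have h : (-(Int.negSucc m) - 1).toNat = m := by simp [Int.negSucc_eq]
    rw [h]; rfl

-- PySem.band agrees with testBit-wise conjunction (all four sign cases)
theorem pvBandTestBit (x y : Int) (i : Nat) :
    (PySem.Int.band x y).testBit i = (x.testBit i && y.testBit i) := by
  rcases le_or_gt 0 x with hx | hx <;> rcases le_or_gt 0 y with hy | hy
  · have hb : PySem.Int.band x y = ((x.toNat &&& y.toNat : Nat) : Int) := by
      simp [PySem.Int.band, hx, hy]
    rw [hb, pvTestBitNonneg _ i (by positivity), pvTestBitNonneg x i hx,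
        pvTestBitNonneg y i hy, Int.toNat_natCast, Nat.testBit_and]
  · have hb : PySem.Int.band x y = ((x.toNat - (x.toNat &&& (-y - 1).toNat) : Nat) : Int) := by
      simp [PySem.Int.band, hx, not_le.mpr hy]
    rw [hb, pvTestBitNonneg _ i (by positivity), Int.toNat_natCast, pvSubAnd,
        pvTestBitNonneg x i hx, pvTestBitNeg y i hy,
        Nat.testBit_xor, Nat.testBit_and]
    cases x.toNat.testBit i <;> cases (-y - 1).toNat.testBit i <;> rfl
  · have hb : PySem.Int.band x y = ((y.toNat - (y.toNat &&& (-x - 1).toNat) : Nat) : Int) := by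
      simp [PySem.Int.band, hy, not_le.mpr hx]
    rw [hb, pvTestBitNonneg _ i (by positivity), Int.toNat_natCast, pvSubAnd,
        pvTestBitNonneg y i hy, pvTestBitNeg x i hx,
        Nat.testBit_xor, Nat.testBit_and]
    cases y.toNat.testBit i <;> cases (-x - 1).toNat.testBit i <;> rfl
  · have hb : PySem.Int.band x y = -(((-x - 1).toNat ||| (-y - 1).toNat : Nat) : Int) - 1 := by
      simp [PySem.Int.band, not_le.mpr hx, not_le.mpr hy]
    have hneg : (-(PySem.Int.band x y) - 1).toNat = ((-x - 1).toNat ||| (-y - 1).toNat) := by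
      rw [hb]; omega
    rw [pvTestBitNeg _ i (by rw [hb]; omega), hneg, Nat.testBit_or,
        pvTestBitNeg x i hx, pvTestBitNeg y i hy]
    cases (-x - 1).toNat.testBit i <;> cases (-y - 1).toNat.testBit i <;> rfl

theorem pvNotTestBit (x : Int) (i : Nat) : (Int.not x).testBit i = !x.testBit i := by
  rcases x with m | m <;> simp [Int.not, Int.testBit]

-- PySem.mod by 2 is Int.emod
theorem pvModTwo (y : Int) : PySem.Int.mod y 2 = y % 2 := by
  have h1 := PySem.Int.floordiv_mul_add_mod y 2
  have h2 := PySem.Int.mod_nonneg y (b := 2) (by norm_num)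
  have h3 := PySem.Int.mod_lt y (b := 2) (by norm_num)
  omega

-- (x >> i) & 1 extracts testBit i
theorem pvBitExtract (x : Int) (i : Nat) :
    PySem.Int.band (x >>> i) 1 = if x.testBit i then 1 else 0 := by
  rw [PySem.Int.band_one, pvModTwo]
  rcases x with m | m
  · rw [show (Int.ofNat m) >>> i = ((m >>> i : Nat) : Int) from (Int.natCast_shiftRight m i).symm,
        show (Int.ofNat m).testBit i = m.testBit i from rfl,
        Nat.testBit_eq_decide_div_mod_eq, ← Nat.shiftRight_eq_div_pow]
    generalize (m >>> i) = k
    rcases Nat.mod_two_eq_zero_or_one k with h | h <;> simp [h] <;> omega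
  · rw [Int.negSucc_shiftRight,
        show (Int.negSucc m).testBit i = !m.testBit i from rfl,
        Nat.testBit_eq_decide_div_mod_eq, ← Nat.shiftRight_eq_div_pow,
        show (Int.negSucc (m >>> i)) = -((m >>> i : Nat) : Int) - 1 from by rw [Int.negSucc_eq]; ring]
    generalize (m >>> i) = k
    rcases Nat.mod_two_eq_zero_or_one k with h | h <;> simp [h] <;> omega


-- bit_count of a Nat below 2^n is the sum of its low n bits
theorem pvBitCountSum : ∀ (n : Nat) (m : Nat), m < 2 ^ n →
    PySem.Int.bitCount (m : Int) = ∑ i ∈ Finset.range n, (if m.testBit i then 1 else 0) := by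
  intro n
  induction n with
  | zero =>
    intro m hm
    interval_cases m
    exact PySem.Int.bitCount_zero
  | succ n ih =>
    intro m hm
    by_cases h0 : m = 0
    · subst h0
      simp [PySem.Int.bitCount_zero]
    · rw [PySem.Int.bitCount_natCast (Nat.pos_of_ne_zero h0)]
      rw [ih (m / 2) (by omega)]
      rw [Finset.sum_range_succ']
      have hz : (if m.testBit 0 then 1 else 0) = m % 2 := by
        rcases Nat.mod_two_eq_zero_or_one m with h | h <;> simp [Nat.testBit_zero, h]
      have hs : ∀ i, m.testBit (i + 1) = (m / 2).testBit i := fun i => Nat.testBit_add_one m i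
      simp only [hs, hz]
      omega

-- bit_count of (y & ((1<<32)-1)) counts the low 32 testBits of y
theorem pvMaskCount (y : Int) :
    PySem.Int.bitCount (PySem.Int.band y (((1 : Int) <<< 32) - 1)) =
      ∑ i ∈ Finset.range 32, (if y.testBit i then 1 else 0) := by
  have hM : ((1 : Int) <<< 32) - 1 = ((2 ^ 32 - 1 : Nat) : Int) := by decide
  have hz : 0 ≤ PySem.Int.band y (((1 : Int) <<< 32) - 1) := by
    rw [PySem.Int.band_comm]
    exact PySem.Int.band_nonneg_of_nonneg_left y (by rw [hM]; positivity)
  set z := PySem.Int.band y (((1 : Int) <<< 32) - 1) with hzdef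
  have hcast : z = ((z.toNat : Nat) : Int) := (Int.toNat_of_nonneg hz).symm
  have htb : ∀ i, z.toNat.testBit i = (y.testBit i && decide (i < 32)) := by
    intro i
    have h1 : z.testBit i = (y.testBit i && (((1 : Int) <<< 32) - 1).testBit i) := pvBandTestBit y _ i
    have h2 : (((1 : Int) <<< 32) - 1).testBit i = (2 ^ 32 - 1 : Nat).testBit i := by rw [hM]; rfl
    have h3 : z.toNat.testBit i = z.testBit i := by rw [hcast]; rfl
    rw [h3, h1, h2, Nat.testBit_two_pow_sub_one]
  have hlt : z.toNat < 2 ^ 32 := by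
    apply Nat.lt_pow_two_of_testBit
    intro i hi
    rw [htb i]
    simp [Nat.not_lt.mpr hi]
  rw [hcast, pvBitCountSum 32 z.toNat hlt]
  apply Finset.sum_congr rfl
  intro i hi
  rw [htb i]
  simp only [Finset.mem_range] at hi
  simp [hi]

-- the per-bit contribution of A's loop body
def pvCost (a b c : Int) (i : Int) : Int :=
  let bitA := PySem.Int.band (a >>> (i.toNat : Int)) 1
  let bitB := PySem.Int.band (b >>> (i.toNat : Int)) 1
  let bitC := PySem.Int.band (c >>> (i.toNat : Int)) 1
  if PySem.Int.bor bitA bitB ≠ bitC then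
    if bitC = 0 then
      if bitA = 1 ∧ bitB = 1 then 2 else 1
    else 1
  else 0

theorem pvFoldlSum (a b c : Int) : ∀ (l : List Int) (ans : Int),
    l.foldl (fun ans i =>
      let bitA := PySem.Int.band (a >>> i.toNat) 1
      let bitB := PySem.Int.band (b >>> i.toNat) 1
      let bitC := PySem.Int.band (c >>> i.toNat) 1
      if PySem.Int.bor bitA bitB ≠ bitC then
        if bitC = 0 then
          if bitA = 1 ∧ bitB = 1 then ans + 2 else ans + 1
        else ans + 1
      else ans) ans = ans + (l.map (pvCost a b c)).sum := by
  intro l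
  induction l with
  | nil => intro ans; simp
  | cons x xs ih =>
    intro ans
    simp only [List.foldl_cons, List.map_cons, List.sum_cons, ih]
    unfold pvCost
    dsimp only
    split_ifs <;> omega

-- A as a Finset.range sum of per-bit costs
theorem pvAeqSum (a b c : Int) :
    minFlips a b c = ∑ i ∈ Finset.range 32, pvCost a b c (i : Int) := by
  unfold minFlips
  rw [pvFoldlSum a b c]
  have hr : PySem.List.pyRange 0 32 1 = (List.range 32).map (fun j : Nat => (j : Int)) := by decide
  rw [hr, List.map_map, zero_add]
  rw [Finset.sum_range fun i => pvCost a b c (i : Int)]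
  rfl

-- per-bit: A's cost equals the three masked-bit indicators
theorem pvPerBit (a b c : Int) (i : Nat) :
    pvCost a b c (i : Int) =
      (if (PySem.Int.band a (Int.not c)).testBit i then 1 else 0)
      + (if (PySem.Int.band b (Int.not c)).testBit i then 1 else 0)
      + (if (PySem.Int.band (PySem.Int.band (Int.not a) (Int.not b)) c).testBit i then 1 else 0) := by
  unfold pvCost
  have hn : ((i : Int)).toNat = i := Int.toNat_natCast i
  simp only [hn, Int.shiftRight_natCast_right, pvBitExtract]
  rw [pvBandTestBit a (Int.not c) i, pvBandTestBit b (Int.not c) i,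
      pvBandTestBit _ c i, pvBandTestBit (Int.not a) (Int.not b) i,
      pvNotTestBit a i, pvNotTestBit b i, pvNotTestBit c i]
  cases a.testBit i <;> cases b.testBit i <;> cases c.testBit i <;> decide

theorem pvMain (a b c : Int) : minFlips a b c = minFlips_alt a b c := by
  rw [pvAeqSum a b c]
  unfold minFlips_alt
  dsimp only
  rw [pvMaskCount (PySem.Int.band a (Int.not c)),
      pvMaskCount (PySem.Int.band b (Int.not c)),
      pvMaskCount (PySem.Int.band (PySem.Int.band (Int.not a) (Int.not b)) c)]
  push_cast
  rw [← Finset.sum_add_distrib, ← Finset.sum_add_distrib]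
  apply Finset.sum_congr rfl
  intro i _
  rw [pvPerBit a b c i]

-- ===== VERDICT (by name: the statement is the Claim_ definition above) =====
theorem minFlips_spec : Claim_equal_minFlips := by
  intro a b c _
  exact pvMain a b c
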